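-- pv_equiv track=rewrite | github.com/Workofarttattoo/aios-unified | tools/web_osint.py | _quantum_optimize_order
-- ===== SOURCE A (Python) =====
-- from typing import List, Dict, Optional, Tuple, Callable
--
-- def _quantum_optimize_order(domain: str, subdomains: List[str]) -> List[str]:
--     """Use quantum algorithm to optimize subdomain search order"""
--     try:
--         # Use quantum state to encode subdomain likelihood
--         # In practice, this would use historical data and pattern recognition
--
--         # For now, prioritize based on common patterns
--         priority_prefixes = ['www', 'api', 'mail', 'admin', 'dev']
--
--         ordered = []
--         for prefix in priority_prefixes:
--             if prefix in subdomains: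
--                 ordered.append(prefix)
--
--         for subdomain in subdomains:
--             if subdomain not in ordered:
--                 ordered.append(subdomain)
--
--         return ordered
--
--     except Exception:
--         return subdomains
-- ===== SOURCE B (Python) =====
-- from typing import List
--
-- def _quantum_optimize_order(domain: str, subdomains: List[str]) -> List[str]:
--     """Rank-table + one stable sort over the deduplicated list."""
--     try:
--         priority_prefixes = ['www', 'api', 'mail', 'admin', 'dev']
--         rank = {p: i for i, p in enumerate(priority_prefixes)}
--         deduped = list(dict.fromkeys(subdomains))
--         return sorted(deduped, key=lambda s: rank.get(s, len(priority_prefixes)))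
--     except Exception:
--         return subdomains
-- ===== Notes on version B (the rewrite author's own statement) =====
-- stated objective: faster
-- what changed: Replaces A's two membership-scanning append loops (priority scan over subdomains, then dedup by rescanning the growing result list) with a rank table built once, a dict.fromkeys deduplication, and a single stable sort keyed by the rank.
import Mathlib
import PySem

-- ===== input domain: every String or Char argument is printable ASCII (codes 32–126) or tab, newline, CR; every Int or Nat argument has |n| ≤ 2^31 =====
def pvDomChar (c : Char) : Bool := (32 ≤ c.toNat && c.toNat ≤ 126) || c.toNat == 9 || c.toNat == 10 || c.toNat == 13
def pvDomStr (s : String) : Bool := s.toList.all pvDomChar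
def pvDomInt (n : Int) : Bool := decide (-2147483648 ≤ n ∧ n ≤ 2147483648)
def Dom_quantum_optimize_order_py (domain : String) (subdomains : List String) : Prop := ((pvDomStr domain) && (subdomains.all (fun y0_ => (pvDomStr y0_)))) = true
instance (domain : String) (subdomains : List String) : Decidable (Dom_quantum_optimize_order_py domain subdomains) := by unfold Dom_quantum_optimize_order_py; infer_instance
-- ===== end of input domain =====

-- B replaces A's two membership-scanning append loops with a rank table, an ordered dedup and one
-- stable sort keyed by the rank (objective: alternative). Neither program raises on String inputs
-- (A's try/except is dead code there), so no Pre_ is needed.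

-- ===== PORT A =====
def quantum_optimize_order_py (domain : String) (subdomains : List String) : List String :=
  let priority_prefixes : List String := ["www", "api", "mail", "admin", "dev"]
  let ordered : List String :=
    priority_prefixes.foldl (fun acc p => if p ∈ subdomains then acc ++ [p] else acc) []
  subdomains.foldl (fun acc s => if s ∈ acc then acc else acc ++ [s]) ordered

-- ===== PORT B =====
def quantum_optimize_order_py_alt (domain : String) (subdomains : List String) : List String :=
  let priority_prefixes : List String := ["www", "api", "mail", "admin", "dev"]
  let rank : PySem.Dict String Int :=
    (PySem.List.enumerate priority_prefixes).foldl (fun d ip => d.insert ip.2 ip.1) PySem.Dict.empty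
  let deduped : List String := PySem.List.dedup subdomains
  PySem.List.sorted deduped (fun s => rank.getD s (PySem.List.len priority_prefixes)) false

-- ===== PRECONDITION & SPEC =====
def Spec_quantum_optimize_order_py (domain : String) (subdomains : List String) (out : List String) : Prop := out = quantum_optimize_order_py_alt domain subdomains
instance (domain : String) (subdomains : List String) (out : List String) : Decidable (Spec_quantum_optimize_order_py domain subdomains out) := by unfold Spec_quantum_optimize_order_py; infer_instance

-- ===== CLAIM (what is proved, stated in full; the proofs are below) =====
def Claim_equal_quantum_optimize_order_py : Prop := ∀ (domain : String) (subdomains : List String), Dom_quantum_optimize_order_py domain subdomains → Spec_quantum_optimize_order_py domain subdomains (quantum_optimize_order_py domain subdomains)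

-- ===== LEMMAS AND PROOFS =====

-- kk: closed form of B's sort key rank.get(s, 5)
def kk (s : String) : Int :=
  if s = "www" then 0 else if s = "api" then 1 else if s = "mail" then 2
  else if s = "admin" then 3 else if s = "dev" then 4 else 5

-- Cat: the six key-buckets of a list, concatenated in key order (what the stable sort produces)
def Cat (xs : List String) : List String :=
  (xs.filter fun s => decide (kk s = 0)) ++ (xs.filter fun s => decide (kk s = 1)) ++
  (xs.filter fun s => decide (kk s = 2)) ++ (xs.filter fun s => decide (kk s = 3)) ++
  (xs.filter fun s => decide (kk s = 4)) ++ (xs.filter fun s => decide (kk s = 5))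

-- dd acc l: the elements of l not in acc, first occurrences, in order (A's second loop; also dedup)
def dd (acc : List String) : List String → List String
  | [] => []
  | x :: l => if x ∈ acc then dd acc l else x :: dd (acc ++ [x]) l

lemma kk_cases (x : String) : kk x = 0 ∨ kk x = 1 ∨ kk x = 2 ∨ kk x = 3 ∨ kk x = 4 ∨ kk x = 5 := by
  unfold kk; split_ifs <;> simp

lemma rank_eval : ((PySem.List.enumerate ["www", "api", "mail", "admin", "dev"]).foldl
      (fun d ip => d.insert ip.2 ip.1) PySem.Dict.empty : PySem.Dict String Int)
    = PySem.Dict.mk [("www", 0), ("api", 1), ("mail", 2), ("admin", 3), ("dev", 4)] := by decide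

lemma key_eq_kk (s : String) :
    (PySem.Dict.getD ((PySem.List.enumerate ["www", "api", "mail", "admin", "dev"]).foldl
      (fun d ip => d.insert ip.2 ip.1) PySem.Dict.empty) s 5) = kk s := by
  rw [rank_eval]
  rcases eq_or_ne s "www" with rfl | h1; · decide
  rcases eq_or_ne s "api" with rfl | h2; · decide
  rcases eq_or_ne s "mail" with rfl | h3; · decide
  rcases eq_or_ne s "admin" with rfl | h4; · decide
  rcases eq_or_ne s "dev" with rfl | h5; · decide
  simp only [PySem.Dict.getD, PySem.Dict.get?, List.find?]
  rw [beq_false_of_ne (Ne.symm h1), beq_false_of_ne (Ne.symm h2), beq_false_of_ne (Ne.symm h3),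
    beq_false_of_ne (Ne.symm h4), beq_false_of_ne (Ne.symm h5)]
  simp [kk, h1, h2, h3, h4, h5]

lemma insertBy_append_left (before : String → String → Bool) (x : String) (as bs : List String)
    (h : ∀ a ∈ as, before x a = false) :
    PySem.List.insertBy before x (as ++ bs) = as ++ PySem.List.insertBy before x bs := by
  induction as with
  | nil => rfl
  | cons a t ih =>
    simp [PySem.List.insertBy, h a (by simp), ih (fun b hb => h b (by simp [hb]))]

lemma insertBy_all_before (before : String → String → Bool) (x : String) (bs : List String)
    (h : ∀ b ∈ bs, before x b = true) :
    PySem.List.insertBy before x bs = x :: bs := by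
  cases bs with
  | nil => rfl
  | cons b t => simp [PySem.List.insertBy, h b (by simp)]

lemma ins_cat (acc : List String) (x : String) :
    PySem.List.insertBy (fun a b => decide (kk a < kk b)) x (Cat acc) = Cat (acc ++ [x]) := by
  have hskip : ∀ (i : Int), i ≤ kk x →
      ∀ a ∈ acc.filter (fun s => decide (kk s = i)), (decide (kk x < kk a)) = false := by
    intro i hi a ha
    have h2 : kk a = i := by simpa using (List.mem_filter.mp ha).2
    simp only [decide_eq_false_iff_not, not_lt, h2]
    exact hi
  have hgt : ∀ (i : Int), kk x < i →
      ∀ a ∈ acc.filter (fun s => decide (kk s = i)), (decide (kk x < kk a)) = true := by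
    intro i hi a ha
    have h2 : kk a = i := by simpa using (List.mem_filter.mp ha).2
    simp only [decide_eq_true_eq, h2]
    exact hi
  rcases kk_cases x with h|h|h|h|h|h <;> simp only [Cat, List.append_assoc]
  · -- kk x = 0
    rw [insertBy_append_left _ _ _ _ (hskip 0 (by omega))]
    rw [insertBy_all_before _ _ _ (by
      intro b hb
      have hb' : kk b = 1 ∨ kk b = 2 ∨ kk b = 3 ∨ kk b = 4 ∨ kk b = 5 := by
        simp only [List.mem_append, List.mem_filter, decide_eq_true_eq] at hb
        tauto
      simp only [decide_eq_true_eq, h]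
      omega)]
    simp [List.filter_append, h]
  · -- kk x = 1
    rw [insertBy_append_left _ _ _ _ (hskip 0 (by omega))]
    rw [insertBy_append_left _ _ _ _ (hskip 1 (by omega))]
    rw [insertBy_all_before _ _ _ (by
      intro b hb
      have hb' : kk b = 2 ∨ kk b = 3 ∨ kk b = 4 ∨ kk b = 5 := by
        simp only [List.mem_append, List.mem_filter, decide_eq_true_eq] at hb
        tauto
      simp only [decide_eq_true_eq, h]
      omega)]
    simp [List.filter_append, h]
  · -- kk x = 2
    rw [insertBy_append_left _ _ _ _ (hskip 0 (by omega))]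
    rw [insertBy_append_left _ _ _ _ (hskip 1 (by omega))]
    rw [insertBy_append_left _ _ _ _ (hskip 2 (by omega))]
    rw [insertBy_all_before _ _ _ (by
      intro b hb
      have hb' : kk b = 3 ∨ kk b = 4 ∨ kk b = 5 := by
        simp only [List.mem_append, List.mem_filter, decide_eq_true_eq] at hb
        tauto
      simp only [decide_eq_true_eq, h]
      omega)]
    simp [List.filter_append, h]
  · -- kk x = 3
    rw [insertBy_append_left _ _ _ _ (hskip 0 (by omega))]
    rw [insertBy_append_left _ _ _ _ (hskip 1 (by omega))]
    rw [insertBy_append_left _ _ _ _ (hskip 2 (by omega))]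
    rw [insertBy_append_left _ _ _ _ (hskip 3 (by omega))]
    rw [insertBy_all_before _ _ _ (by
      intro b hb
      have hb' : kk b = 4 ∨ kk b = 5 := by
        simp only [List.mem_append, List.mem_filter, decide_eq_true_eq] at hb
        tauto
      simp only [decide_eq_true_eq, h]
      omega)]
    simp [List.filter_append, h]
  · -- kk x = 4
    rw [insertBy_append_left _ _ _ _ (hskip 0 (by omega))]
    rw [insertBy_append_left _ _ _ _ (hskip 1 (by omega))]
    rw [insertBy_append_left _ _ _ _ (hskip 2 (by omega))]
    rw [insertBy_append_left _ _ _ _ (hskip 3 (by omega))]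
    rw [insertBy_append_left _ _ _ _ (hskip 4 (by omega))]
    rw [insertBy_all_before _ _ _ (by
      intro b hb
      have hb' : kk b = 5 := by
        simp only [List.mem_filter, decide_eq_true_eq] at hb
        tauto
      simp only [decide_eq_true_eq, h]
      omega)]
    simp [List.filter_append, h]
  · -- kk x = 5
    rw [insertBy_append_left _ _ _ _ (hskip 0 (by omega))]
    rw [insertBy_append_left _ _ _ _ (hskip 1 (by omega))]
    rw [insertBy_append_left _ _ _ _ (hskip 2 (by omega))]
    rw [insertBy_append_left _ _ _ _ (hskip 3 (by omega))]
    rw [insertBy_append_left _ _ _ _ (hskip 4 (by omega))]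
    rw [PySem.List.insertBy_of_forall_not_before _ _ _ (hskip 5 (by omega))]
    simp [List.filter_append, h]

lemma foldl_ins_cat : ∀ (l acc : List String),
    l.foldl (fun acc x => PySem.List.insertBy (fun a b => decide (kk a < kk b)) x acc) (Cat acc)
      = Cat (acc ++ l) := by
  intro l
  induction l with
  | nil => intro acc; simp
  | cons x l ih =>
    intro acc
    simp only [List.foldl_cons, ins_cat acc x, ih (acc ++ [x]), List.append_assoc,
      List.singleton_append]

lemma sorted_eq_cat (xs : List String) : PySem.List.sorted xs kk false = Cat xs := by
  rw [PySem.List.sorted_eq_foldl_insertBy]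
  have h := foldl_ins_cat xs []
  simpa [Cat] using h

lemma foldl_dd : ∀ (l acc : List String),
    l.foldl (fun acc s => if s ∈ acc then acc else acc ++ [s]) acc = acc ++ dd acc l := by
  intro l
  induction l with
  | nil => intro acc; simp [dd]
  | cons x l ih =>
    intro acc
    by_cases hx : x ∈ acc
    · simp [dd, hx, ih]
    · simp [dd, hx, ih (acc ++ [x])]

lemma foldl_add_dd : ∀ (l acc : List String), l.foldl PySem.Set.add acc = acc ++ dd acc l := by
  intro l
  induction l with
  | nil => intro acc; simp [dd]
  | cons x l ih =>
    intro acc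
    by_cases hx : x ∈ acc
    · simp [PySem.Set.add, PySem.Set.contains, dd, hx, ih]
    · simp [PySem.Set.add, PySem.Set.contains, dd, hx, ih (acc ++ [x])]

lemma dedup_eq_dd (l : List String) : PySem.List.dedup l = dd [] l := by
  show PySem.Set.ofList l = dd [] l
  rw [PySem.Set.ofList_eq_foldl, foldl_add_dd]
  simp

lemma dd_congr : ∀ (l a b : List String), (∀ y, y ∈ a ↔ y ∈ b) → dd a l = dd b l := by
  intro l
  induction l with
  | nil => intro a b _; rfl
  | cons x l ih =>
    intro a b h
    by_cases hx : x ∈ a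
    · simp [dd, hx, (h x).mp hx, ih a b h]
    · have hxb : x ∉ b := fun hc => hx ((h x).mpr hc)
      simp only [dd, if_neg hx, if_neg hxb]
      congr 1
      exact ih _ _ (fun y => by simp [h y])

lemma dd_split : ∀ (l a b : List String),
    dd (a ++ b) l = (dd b l).filter (fun y => decide (y ∉ a)) := by
  intro l
  induction l with
  | nil => intro a b; rfl
  | cons x l ih =>
    intro a b
    by_cases hxa : x ∈ a <;> by_cases hxb : x ∈ b
    · simp [dd, hxa, hxb, ih]
    · have : dd (a ++ b) l = dd (a ++ (b ++ [x])) l :=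
        dd_congr l _ _ (fun y => by simp; by_cases hy : y = x <;> simp [hy, hxa] <;> tauto)
      simp only [dd, if_pos (by simp [hxa] : x ∈ a ++ b), if_neg hxb, this, ih,
        List.filter_cons, decide_eq_true_eq]
      simp [hxa]
    · simp [dd, hxa, hxb, ih]
    · simp only [dd, if_neg (by simp [hxa, hxb] : ¬ x ∈ a ++ b), if_neg hxb,
        List.filter_cons]
      simp only [hxa, not_false_iff, decide_true, if_pos]
      rw [show a ++ b ++ [x] = a ++ (b ++ [x]) from List.append_assoc a b [x], ih]

lemma mem_dd : ∀ (l acc : List String) (y : String), y ∈ dd acc l ↔ y ∈ l ∧ y ∉ acc := by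
  intro l
  induction l with
  | nil => intro acc y; simp [dd]
  | cons x l ih =>
    intro acc y
    by_cases hx : x ∈ acc
    · simp only [dd, if_pos hx, ih, List.mem_cons]
      constructor
      · tauto
      · rintro ⟨(rfl | hy), hya⟩
        · exact absurd hx hya
        · tauto
    · simp only [dd, if_neg hx, List.mem_cons, ih, List.mem_append, List.mem_singleton]
      by_cases hy : y = x <;> simp [hy, hx] <;> tauto

lemma dd_nodup : ∀ (l acc : List String), (dd acc l).Nodup := by
  intro l
  induction l with
  | nil => intro acc; simp [dd]
  | cons x l ih =>
    intro acc
    by_cases hx : x ∈ acc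
    · simp [dd, hx, ih]
    · simp only [dd, if_neg hx, List.nodup_cons]
      refine ⟨fun hc => ?_, ih _⟩
      exact ((mem_dd l _ x).mp hc).2 (by simp)

lemma filter_beq_nodup (a : String) : ∀ (D : List String), D.Nodup →
    D.filter (fun s => s == a) = if a ∈ D then [a] else [] := by
  intro D
  induction D with
  | nil => simp
  | cons x t ih =>
    intro h
    rcases List.nodup_cons.mp h with ⟨hx, ht⟩
    by_cases hxa : x = a
    · subst hxa
      have hnil : List.filter (fun s => s == x) t = [] := by
        apply List.filter_eq_nil_iff.mpr
        intro b hb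
        simp
        rintro rfl; exact hx hb
      simp [List.filter_cons, hnil, hx]
    · simp [List.filter_cons, hxa, ih ht, Ne.symm hxa]

-- ===== assembling the two sides =====

lemma a_side (domain : String) (subdomains : List String) :
    quantum_optimize_order_py domain subdomains =
      (["www", "api", "mail", "admin", "dev"].filter (fun p => decide (p ∈ subdomains)))
        ++ dd (["www", "api", "mail", "admin", "dev"].filter (fun p => decide (p ∈ subdomains))) subdomains := by
  unfold quantum_optimize_order_py
  show List.foldl (fun acc s => if s ∈ acc then acc else acc ++ [s])
      (List.foldl (fun acc p => if p ∈ subdomains then acc ++ [p] else acc) []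
        ["www", "api", "mail", "admin", "dev"]) subdomains = _
  rw [PySem.List.foldl_append_ite_eq_filter, foldl_dd]
  simp

lemma b_side (domain : String) (subdomains : List String) :
    quantum_optimize_order_py_alt domain subdomains = Cat (dd [] subdomains) := by
  unfold quantum_optimize_order_py_alt
  show PySem.List.sorted (PySem.List.dedup subdomains)
      (fun s => PySem.Dict.getD ((PySem.List.enumerate ["www", "api", "mail", "admin", "dev"]).foldl
        (fun d ip => d.insert ip.2 ip.1) PySem.Dict.empty) s
        (PySem.List.len ["www", "api", "mail", "admin", "dev"])) false = _
  have hk : (fun s => PySem.Dict.getD ((PySem.List.enumerate ["www", "api", "mail", "admin", "dev"]).foldl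
        (fun d ip => d.insert ip.2 ip.1) PySem.Dict.empty) s
        (PySem.List.len ["www", "api", "mail", "admin", "dev"])) = kk := by
    funext s
    exact key_eq_kk s
  rw [hk, dedup_eq_dd, sorted_eq_cat]

lemma hiff0 : ∀ y : String, kk y = 0 ↔ y = "www" := by
  intro y; unfold kk; split_ifs <;> simp_all
lemma hiff1 : ∀ y : String, kk y = 1 ↔ y = "api" := by
  intro y; unfold kk; split_ifs <;> simp_all
lemma hiff2 : ∀ y : String, kk y = 2 ↔ y = "mail" := by
  intro y; unfold kk; split_ifs <;> simp_all
lemma hiff3 : ∀ y : String, kk y = 3 ↔ y = "admin" := by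
  intro y; unfold kk; split_ifs <;> simp_all
lemma hiff4 : ∀ y : String, kk y = 4 ↔ y = "dev" := by
  intro y; unfold kk; split_ifs <;> simp_all
lemma hiff5 : ∀ y : String, kk y = 5 ↔ y ∉ (["www", "api", "mail", "admin", "dev"] : List String) := by
  intro y; unfold kk; split_ifs <;> simp_all

lemma bucket_eq (subdomains : List String) (i : Int) (w : String)
    (hiff : ∀ y : String, kk y = i ↔ y = w) :
    (dd [] subdomains).filter (fun s => decide (kk s = i))
      = if w ∈ subdomains then [w] else [] := by
  have hnodup := dd_nodup subdomains []
  have hmem : ∀ y : String, y ∈ dd [] subdomains ↔ y ∈ subdomains := fun y => by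
    simpa using mem_dd subdomains [] y
  have h1 : (dd [] subdomains).filter (fun s => decide (kk s = i))
      = (dd [] subdomains).filter (fun s => s == w) := by
    apply List.filter_congr
    intro y _
    by_cases hyw : y = w
    · subst hyw; simp [(hiff y).mpr rfl]
    · have : ¬ kk y = i := fun hc => hyw ((hiff y).mp hc)
      simp [this, hyw]
  rw [h1, filter_beq_nodup _ _ hnodup]
  simp [hmem w]

lemma main_eq (domain : String) (subdomains : List String) :
    quantum_optimize_order_py domain subdomains = quantum_optimize_order_py_alt domain subdomains := by
  rw [a_side, b_side]
  have hd5 : (dd [] subdomains).filter (fun s => decide (kk s = 5))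
      = dd (["www", "api", "mail", "admin", "dev"].filter (fun p => decide (p ∈ subdomains))) subdomains := by
    have hsplit := dd_split subdomains
      (["www", "api", "mail", "admin", "dev"].filter (fun p => decide (p ∈ subdomains))) []
    rw [List.append_nil] at hsplit
    rw [hsplit]
    apply List.filter_congr
    intro y hy
    have hys : y ∈ subdomains := ((mem_dd subdomains [] y).mp hy).1
    by_cases hyp : y ∈ (["www", "api", "mail", "admin", "dev"] : List String)
    · have h5 : ¬ kk y = 5 := fun hc => (hiff5 y).mp hc hyp
      have hmemP : y ∈ ["www", "api", "mail", "admin", "dev"].filter (fun p => decide (p ∈ subdomains)) := by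
        simp [List.mem_filter, hyp, hys]
      simp [hmemP, h5]
    · have h5 : kk y = 5 := (hiff5 y).mpr hyp
      have hmemP : y ∉ ["www", "api", "mail", "admin", "dev"].filter (fun p => decide (p ∈ subdomains)) := by
        simp [List.mem_filter]
        intro hc
        exact absurd hc (by simpa using hyp)
      simp [hmemP, h5]
  rw [Cat, bucket_eq subdomains 0 "www" hiff0, bucket_eq subdomains 1 "api" hiff1,
    bucket_eq subdomains 2 "mail" hiff2, bucket_eq subdomains 3 "admin" hiff3,
    bucket_eq subdomains 4 "dev" hiff4, hd5]
  by_cases h1 : "www" ∈ subdomains <;> by_cases h2 : "api" ∈ subdomains <;>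
    by_cases h3 : "mail" ∈ subdomains <;> by_cases h4 : "admin" ∈ subdomains <;>
    by_cases h5 : "dev" ∈ subdomains <;>
    simp [List.filter, h1, h2, h3, h4, h5]

-- ===== VERDICT (by name: the statement is the Claim_ definition above) =====
theorem quantum_optimize_order_py_spec : Claim_equal_quantum_optimize_order_py := by
  intro domain subdomains _
  unfold Spec_quantum_optimize_order_py
  exact main_eq domain subdomains
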